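-- pv_equiv track=rewrite | github.com/Kepter/CompetitiveProgramming | hackerrank/Implementation/manasa-and-stones.py | stones
-- ===== SOURCE A (Python) =====
-- def stones(n, a, b):
--     q = set([0])
--
--     for i in range(n-1):
--         nq = set()
--         while len(q) > 0:
--             v = q.pop()
--
--             nq.add(v + a)
--             nq.add(v + b)
--
--         q = nq
--
--     q = list(q)
--     q.sort()
--     return q
-- ===== SOURCE B (Python) =====
-- def stones(n, a, b):
--     if n <= 1:
--         return [0]
--     return sorted({(n - 1 - k) * a + k * b for k in range(n)})
-- ===== Notes on version B (the rewrite author's own statement) =====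
-- stated objective: faster
-- what changed: B replaces A's n-1 rounds of rebuilding a set from the previous set with a direct closed form: the reachable values are exactly (n-1-k)*a+k*b for k in 0..n-1, built in one comprehension, deduplicated and sorted.
import Mathlib
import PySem

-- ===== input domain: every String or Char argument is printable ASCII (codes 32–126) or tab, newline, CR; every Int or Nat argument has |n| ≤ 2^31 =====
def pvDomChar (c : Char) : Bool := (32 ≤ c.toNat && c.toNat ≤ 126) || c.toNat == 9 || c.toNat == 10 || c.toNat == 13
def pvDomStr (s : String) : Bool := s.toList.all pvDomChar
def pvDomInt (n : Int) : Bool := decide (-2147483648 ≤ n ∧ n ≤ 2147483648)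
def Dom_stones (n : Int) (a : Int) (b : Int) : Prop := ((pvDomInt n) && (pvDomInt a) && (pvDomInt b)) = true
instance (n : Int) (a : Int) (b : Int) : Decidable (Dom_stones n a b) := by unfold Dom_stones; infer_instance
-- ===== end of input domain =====

-- B replaces A's n-1 rounds of set rebuilding by the closed form {(n-1-k)*a+k*b | 0 ≤ k < n}, deduped and sorted.

-- ===== PORT A =====
-- A: q = {0}; n-1 times, rebuild q as {v+a, v+b for v in q} (the while/pop loop is a fold
-- over the set's elements; the final sorted list does not depend on pop order); sort.
def stones (n : Int) (a : Int) (b : Int) : List Int :=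
  let q0 : PySem.Set Int := PySem.Set.ofList [0]
  let q := (PySem.List.pyRange 0 (n - 1) 1).foldl
    (fun q _ =>
      q.foldl (fun nq v => PySem.Set.add (PySem.Set.add nq (v + a)) (v + b)) PySem.Set.empty)
    q0
  PySem.List.sorted q (fun x => x) false

-- ===== PORT B =====
def stones_alt (n : Int) (a : Int) (b : Int) : List Int :=
  if n ≤ 1 then [0]
  else PySem.List.sorted
    (PySem.Set.ofList ((PySem.List.pyRange 0 n 1).map (fun k => (n - 1 - k) * a + k * b)))
    (fun x => x) false

-- ===== PRECONDITION & SPEC =====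
def Spec_stones (n : Int) (a : Int) (b : Int) (out : List Int) : Prop := out = stones_alt n a b
instance (n : Int) (a : Int) (b : Int) (out : List Int) : Decidable (Spec_stones n a b out) := by unfold Spec_stones; infer_instance

-- ===== CLAIM (what is proved, stated in full; the proofs are below) =====
def Claim_equal_stones : Prop := ∀ (n : Int) (a : Int) (b : Int), Dom_stones n a b → Spec_stones n a b (stones n a b)

-- ===== LEMMAS AND PROOFS =====

/-- One round of A's loop. -/
def pvStep (a b : Int) (q : PySem.Set Int) : PySem.Set Int :=
  q.foldl (fun nq v => PySem.Set.add (PySem.Set.add nq (v + a)) (v + b)) PySem.Set.empty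

theorem pvMemStepAux (a b : Int) (q : List Int) (acc : List Int) (x : Int) :
    x ∈ q.foldl (fun nq v => PySem.Set.add (PySem.Set.add nq (v + a)) (v + b)) acc ↔
      x ∈ acc ∨ ∃ u ∈ q, x = u + a ∨ x = u + b := by
  induction q generalizing acc with
  | nil => simp
  | cons v t ih =>
    simp only [List.foldl_cons, ih, PySem.Set.mem_add, List.mem_cons]
    constructor
    · rintro (((h | h) | h) | ⟨u, hu, h⟩)
      · exact Or.inl h
      · exact Or.inr ⟨v, Or.inl rfl, Or.inl h⟩
      · exact Or.inr ⟨v, Or.inl rfl, Or.inr h⟩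
      · exact Or.inr ⟨u, Or.inr hu, h⟩
    · rintro (h | ⟨u, (rfl | hu), h⟩)
      · exact Or.inl (Or.inl (Or.inl h))
      · rcases h with h | h
        · exact Or.inl (Or.inl (Or.inr h))
        · exact Or.inl (Or.inr h)
      · exact Or.inr ⟨u, hu, h⟩

theorem pvNodupStepAux (a b : Int) (q : List Int) (acc : List Int) (h : acc.Nodup) :
    (q.foldl (fun nq v => PySem.Set.add (PySem.Set.add nq (v + a)) (v + b)) acc).Nodup := by
  induction q generalizing acc with
  | nil => simpa using h
  | cons v t ih =>
    exact ih _ (PySem.Set.nodup_add _ _ (PySem.Set.nodup_add _ _ h))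

theorem pvFoldlConst {α β : Type} (f : α → α) (l : List β) (init : α) :
    l.foldl (fun q _ => f q) init = f^[l.length] init := by
  induction l generalizing init with
  | nil => rfl
  | cons x t ih => simp [List.foldl_cons, ih, Function.iterate_succ_apply]

theorem pvMemIter (a b : Int) (m : Nat) (x : Int) :
    x ∈ (pvStep a b)^[m] (PySem.Set.ofList [0]) ↔
      ∃ k : Nat, k ≤ m ∧ x = ((m : Int) - k) * a + k * b := by
  induction m generalizing x with
  | zero =>
    simp only [Function.iterate_zero, id_eq, PySem.Set.mem_ofList, List.mem_singleton]
    constructor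
    · rintro rfl; exact ⟨0, le_rfl, by simp⟩
    · rintro ⟨k, hk, rfl⟩
      interval_cases k
      simp
  | succ m ih =>
    rw [Function.iterate_succ_apply']
    unfold pvStep
    rw [pvMemStepAux]
    constructor
    · rintro (h | ⟨u, hu, h⟩)
      · cases h
      · rcases (ih u).1 hu with ⟨k, hk, rfl⟩
        rcases h with rfl | rfl
        · exact ⟨k, by omega, by push_cast; ring⟩
        · exact ⟨k + 1, by omega, by push_cast; ring⟩
    · rintro ⟨k, hk, rfl⟩
      rcases Nat.lt_or_ge k (m + 1) with hlt | hge
      · refine Or.inr ⟨((m : Int) - k) * a + k * b, (ih _).2 ⟨k, by omega, rfl⟩, Or.inl ?_⟩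
        push_cast; ring
      · have hk' : k = m + 1 := by omega
        subst hk'
        refine Or.inr ⟨((m : Int) - m) * a + m * b, (ih _).2 ⟨m, le_rfl, rfl⟩, Or.inr ?_⟩
        push_cast; ring

theorem pvNodupIter (a b : Int) (m : Nat) :
    ((pvStep a b)^[m] (PySem.Set.ofList [0])).Nodup := by
  cases m with
  | zero => simp [PySem.Set.ofList]
  | succ m =>
    rw [Function.iterate_succ_apply']
    exact pvNodupStepAux a b _ _ List.nodup_nil

-- ===== VERDICT (by name: the statement is the Claim_ definition above) =====
theorem stones_spec : Claim_equal_stones := by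
  intro n a b _
  unfold Spec_stones
  have hfold := pvFoldlConst (pvStep a b) (PySem.List.pyRange 0 (n - 1) 1) (PySem.Set.ofList [0])
  simp only [pvStep] at hfold
  show PySem.List.sorted
      ((PySem.List.pyRange 0 (n - 1) 1).foldl
        (fun q _ => q.foldl (fun nq v => PySem.Set.add (PySem.Set.add nq (v + a)) (v + b)) PySem.Set.empty)
        (PySem.Set.ofList [0]))
      (fun x => x) false = stones_alt n a b
  rw [hfold, PySem.List.length_pyRange_one]
  unfold stones_alt
  by_cases h : n ≤ 1
  · rw [if_pos h]
    have hm : (n - 1 - 0).toNat = 0 := by omega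
    rw [hm]
    rfl
  · rw [if_neg h]
    set m : Nat := (n - 1 - 0).toNat with hm
    have hmn : (m : Int) = n - 1 := by omega
    apply (PySem.List.sorted_id_eq_sorted_id_iff_perm _ _).2
    rw [List.perm_ext_iff_of_nodup (pvNodupIter a b m) (PySem.Set.nodup_ofList _)]
    intro x
    rw [pvMemIter, PySem.Set.mem_ofList]
    simp only [List.mem_map, PySem.List.mem_pyRange_one]
    constructor
    · rintro ⟨k, hk, rfl⟩
      refine ⟨(k : Int), ?_, ?_⟩
      · omega
      · rw [hmn]
    · rintro ⟨k, hk, rfl⟩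
      refine ⟨k.toNat, by omega, ?_⟩
      rw [hmn, Int.toNat_of_nonneg hk.1]
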